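-- pv_equiv track=rewrite | github.com/omaks45/financial_ml_project | finance-ml/ml/analyzer.py | _segment_performance
-- ===== SOURCE A (Python) =====
-- from typing import Dict, Any, Optional, List, Tuple
--
-- def _segment_performance(results: Dict[str, Dict]) -> Dict[str, List[str]]:
--     """Segment companies by performance levels"""
--     segments = {
--         'top_tier': [],
--         'upper_mid': [],
--         'lower_mid': [],
--         'bottom_tier': []
--     }
--
--     for company_id, result in results.items():
--         score = result['overall_score']
--         if score >= 80:
--             segments['top_tier'].append(company_id)
--         elif score >= 65:
--             segments['upper_mid'].append(company_id)
--         elif score >= 45: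
--             segments['lower_mid'].append(company_id)
--         else:
--             segments['bottom_tier'].append(company_id)
--
--     return segments
-- ===== SOURCE B (Python) =====
-- from typing import Dict, List
--
-- def _segment_performance(results: Dict[str, Dict]) -> Dict[str, List[str]]:
--     """Segment companies by performance levels: one filtered pass per tier band."""
--     bands = [('top_tier', 80, None), ('upper_mid', 65, 80),
--              ('lower_mid', 45, 65), ('bottom_tier', None, 45)]
--     return {
--         name: [cid for cid, r in results.items()
--                if (lo is None or r['overall_score'] >= lo)
--                and (hi is None or r['overall_score'] < hi)]
--         for name, lo, hi in bands
--     }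
-- ===== Notes on version B (the rewrite author's own statement) =====
-- stated objective: idiomatic
-- what changed: Instead of one pass that buckets into a mutable dict via an if/elif cascade, B builds the result with a dict comprehension of four staged filter passes, one per half-open score band from a declarative bands table.
import Mathlib
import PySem

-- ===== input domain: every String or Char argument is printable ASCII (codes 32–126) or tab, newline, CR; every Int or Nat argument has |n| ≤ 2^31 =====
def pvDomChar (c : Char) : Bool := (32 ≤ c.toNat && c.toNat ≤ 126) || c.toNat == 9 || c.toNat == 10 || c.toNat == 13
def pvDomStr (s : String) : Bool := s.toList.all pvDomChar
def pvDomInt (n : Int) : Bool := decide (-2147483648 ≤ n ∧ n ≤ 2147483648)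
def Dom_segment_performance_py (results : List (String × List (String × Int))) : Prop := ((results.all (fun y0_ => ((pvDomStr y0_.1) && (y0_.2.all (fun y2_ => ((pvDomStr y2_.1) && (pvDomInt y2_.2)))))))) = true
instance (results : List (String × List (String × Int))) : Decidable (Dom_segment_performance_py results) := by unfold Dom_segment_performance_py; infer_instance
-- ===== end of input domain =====

-- B replaces A's single mutating pass with an if/elif cascade by a declarative bands table and one filter pass per tier (idiomatic, same asymptotic cost).


-- ===== PORT A =====
-- one loop iteration of A: score = result['overall_score'] (KeyError excluded by Pre_, so getD's default is never read), then the if/elif cascade appends company_id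
def segAStep (segs : PySem.Dict String (List String)) (p : String × List (String × Int)) : PySem.Dict String (List String) :=
  let score := (PySem.Dict.mk p.2).getD "overall_score" 0
  if 80 ≤ score then segs.modify "top_tier" [] (fun l => l ++ [p.1])
  else if 65 ≤ score then segs.modify "upper_mid" [] (fun l => l ++ [p.1])
  else if 45 ≤ score then segs.modify "lower_mid" [] (fun l => l ++ [p.1])
  else segs.modify "bottom_tier" [] (fun l => l ++ [p.1])

def segment_performance_py (results : List (String × List (String × Int))) : List (String × List String) :=
  (results.foldl segAStep
    (PySem.Dict.ofList [("top_tier", []), ("upper_mid", []), ("lower_mid", []), ("bottom_tier", [])])).items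

-- ===== PORT B =====
-- B's bands table: (name, lo, hi) with half-open score bands [lo, hi); None = unbounded
def segBands : List (String × Option Int × Option Int) :=
  [("top_tier", some 80, none), ("upper_mid", some 65, some 80),
   ("lower_mid", some 45, some 65), ("bottom_tier", none, some 45)]

-- the comprehension's filter condition: (lo is None or score >= lo) and (hi is None or score < hi)
def segInBand (lo hi : Option Int) (s : Int) : Bool :=
  (match lo with | none => true | some l => decide (l ≤ s)) &&
  (match hi with | none => true | some h => decide (s < h))

-- B: dict comprehension over the bands table, one filter pass per band
def segment_performance_py_alt (results : List (String × List (String × Int))) : List (String × List String) :=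
  segBands.map (fun b =>
    (b.1, (results.filter
            (fun p => segInBand b.2.1 b.2.2 ((PySem.Dict.mk p.2).getD "overall_score" 0))).map (·.1)))

-- ===== PRECONDITION & SPEC =====
-- Pre_ excludes exactly the inputs where some inner dict lacks the 'overall_score' key: there the Python A (and B) raises KeyError.
def Pre_segment_performance_py (results : List (String × List (String × Int))) : Prop :=
  ∀ p ∈ results, (PySem.Dict.mk p.2).contains "overall_score" = true
instance (results : List (String × List (String × Int))) : Decidable (Pre_segment_performance_py results) := by unfold Pre_segment_performance_py; infer_instance

def pvWitness_segment_performance_py : (List (String × List (String × Int))) :=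
  [("acme", [("overall_score", 90)]), ("zeta", [("overall_score", 12)])]

def Spec_segment_performance_py (results : List (String × List (String × Int))) (out : List (String × List String)) : Prop := out = segment_performance_py_alt results
instance (results : List (String × List (String × Int))) (out : List (String × List String)) : Decidable (Spec_segment_performance_py results out) := by unfold Spec_segment_performance_py; infer_instance

-- ===== CLAIM (what is proved, stated in full; the proofs are below) =====
def Claim_equal_segment_performance_py : Prop := ∀ (results : List (String × List (String × Int))), Dom_segment_performance_py results → Pre_segment_performance_py results → Spec_segment_performance_py results (segment_performance_py results)

-- ===== LEMMAS AND PROOFS =====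

-- score of one entry
def segScore (p : String × List (String × Int)) : Int := (PySem.Dict.mk p.2).getD "overall_score" 0

-- the four-key accumulator dict A maintains, parameterised by its current lists
def segDict (a b c d : List String) : PySem.Dict String (List String) :=
  PySem.Dict.mk [("top_tier", a), ("upper_mid", b), ("lower_mid", c), ("bottom_tier", d)]

-- A's loop invariant: folding from any accumulator state appends, per tier, exactly the filtered company ids
theorem segFold_inv (rs : List (String × List (String × Int))) :
    ∀ a b c d, (rs.foldl segAStep (segDict a b c d)).items =
      [("top_tier",   a ++ (rs.filter (fun p => decide (80 ≤ segScore p))).map (·.1)),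
       ("upper_mid",  b ++ (rs.filter (fun p => decide (65 ≤ segScore p) && decide (segScore p < 80))).map (·.1)),
       ("lower_mid",  c ++ (rs.filter (fun p => decide (45 ≤ segScore p) && decide (segScore p < 65))).map (·.1)),
       ("bottom_tier", d ++ (rs.filter (fun p => decide (segScore p < 45))).map (·.1))] := by
  induction rs with
  | nil => intro a b c d; simp [segDict]
  | cons p rs ih =>
    intro a b c d
    simp only [List.foldl_cons, List.filter_cons]
    have hstep : segAStep (segDict a b c d) p =
        if 80 ≤ segScore p then segDict (a ++ [p.1]) b c d
        else if 65 ≤ segScore p then segDict a (b ++ [p.1]) c d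
        else if 45 ≤ segScore p then segDict a b (c ++ [p.1]) d
        else segDict a b c (d ++ [p.1]) := by
      simp only [segAStep, segScore, segDict, PySem.Dict.modify]
      split_ifs <;> rfl
    rw [hstep]
    rcases lt_or_ge (segScore p) 45 with h1 | h1
    · rw [if_neg (by omega), if_neg (by omega), if_neg (by omega), ih]
      simp only [decide_eq_true_eq]
      rw [if_neg (by omega), if_neg (by simp; omega), if_neg (by simp; omega), if_pos (by omega)]
      simp [List.append_assoc]
    · rcases lt_or_ge (segScore p) 65 with h2 | h2
      · rw [if_neg (by omega), if_neg (by omega), if_pos (by omega), ih]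
        simp only [decide_eq_true_eq]
        rw [if_neg (by omega), if_neg (by simp; omega), if_pos (by simp; omega), if_neg (by omega)]
        simp [List.append_assoc]
      · rcases lt_or_ge (segScore p) 80 with h3 | h3
        · rw [if_neg (by omega), if_pos (by omega), ih]
          simp only [decide_eq_true_eq]
          rw [if_neg (by omega), if_pos (by simp; omega), if_neg (by simp; omega), if_neg (by omega)]
          simp [List.append_assoc]
        · rw [if_pos (by omega), ih]
          simp only [decide_eq_true_eq]
          rw [if_pos (by omega), if_neg (by simp; omega), if_neg (by simp; omega), if_neg (by omega)]
          simp [List.append_assoc]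

-- ===== VERDICT (by name: the statement is the Claim_ definition above) =====
theorem segment_performance_py_spec : Claim_equal_segment_performance_py := by
  intro results _ _
  unfold Spec_segment_performance_py segment_performance_py segment_performance_py_alt
  have h := segFold_inv results [] [] [] []
  rw [show PySem.Dict.ofList [("top_tier", ([] : List String)), ("upper_mid", []), ("lower_mid", []), ("bottom_tier", [])] = segDict [] [] [] [] from rfl, h]
  simp only [segBands, List.map_cons, List.map_nil, segInBand, segScore, List.nil_append,
    Bool.true_and, Bool.and_true]
  rfl
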